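-- pv_equiv track=rewrite | github.com/deepakrkris/DsAlgo | algorithms/06_rotations/day01/01_rotations_number.py | num_rotations
-- ===== SOURCE A (Python) =====
-- def num_rotations(num) :
--
--     num_digits = len(str(num))
--     first_digit_place = pow(10, num_digits - 1)
--     count = num_digits - 1
--
--     result = []
--
--     while count > 0 :
--         last_digit = num % 10
--         num = num // 10
--         num += last_digit * first_digit_place
--         result.append(num)
--         count -= 1
--
--     return result
-- ===== SOURCE B (Python) =====
-- def num_rotations(num):
--     d = len(str(num))
--     return [(num % 10**i) * 10**(d - i) + num // 10**i for i in range(1, d)]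
-- ===== Notes on version B (the rewrite author's own statement) =====
-- stated objective: simpler
-- what changed: Replaces A's while-loop that mutates a running value (and a separate countdown counter) with a single comprehension computing each rotation independently from the original number by a closed-form split num -> (num % 10**i, num // 10**i).
import Mathlib
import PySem

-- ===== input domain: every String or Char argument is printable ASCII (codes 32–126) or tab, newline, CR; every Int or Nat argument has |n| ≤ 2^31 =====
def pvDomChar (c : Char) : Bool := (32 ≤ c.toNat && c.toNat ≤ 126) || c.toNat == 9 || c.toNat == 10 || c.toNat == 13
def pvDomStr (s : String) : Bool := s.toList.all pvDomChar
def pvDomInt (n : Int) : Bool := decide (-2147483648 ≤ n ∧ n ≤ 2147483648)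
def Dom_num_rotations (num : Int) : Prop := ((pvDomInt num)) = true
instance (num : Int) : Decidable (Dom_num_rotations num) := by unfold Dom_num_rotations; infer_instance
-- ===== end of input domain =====

-- B computes each digit rotation independently from the original number by a
-- closed-form split, replacing A's while-loop that mutates a running value.

-- ===== PORT A =====
-- the while loop of A: 'count' iterations, mutating 'num' and appending to 'result'
def numRotationsLoop (first_digit_place : Int) : Nat → Int → List Int → List Int
  | 0, _, result => result
  | Nat.succ count, num, result =>
      let last_digit := PySem.Int.mod num 10
      let num1 := PySem.Int.floordiv num 10
      let num2 := num1 + last_digit * first_digit_place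
      numRotationsLoop first_digit_place count num2 (result ++ [num2])

def num_rotations (num : Int) : List Int :=
  let num_digits : Int := PySem.Str.len (PySem.Int.toStr num)
  -- pow(10, num_digits - 1): num_digits ≥ 1, so the Nat exponent is exact
  let first_digit_place : Int := 10 ^ (num_digits - 1).toNat
  -- 'while count > 0' with count initialised to num_digits - 1 runs (num_digits - 1).toNat times
  numRotationsLoop first_digit_place (num_digits - 1).toNat num []

-- ===== PORT B =====
def num_rotations_alt (num : Int) : List Int :=
  let d : Int := PySem.Str.len (PySem.Int.toStr num)
  -- 10**i and 10**(d-i) have nonnegative exponents (1 ≤ i < d), so .toNat is exact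
  (PySem.List.pyRange 1 d 1).map (fun i =>
    PySem.Int.mod num (10 ^ i.toNat) * 10 ^ ((d - i).toNat) + PySem.Int.floordiv num (10 ^ i.toNat))

-- ===== PRECONDITION & SPEC =====
def Spec_num_rotations (num : Int) (out : List Int) : Prop := out = num_rotations_alt num
instance (num : Int) (out : List Int) : Decidable (Spec_num_rotations num out) := by unfold Spec_num_rotations; infer_instance

-- ===== CLAIM (what is proved, stated in full; the proofs are below) =====
def Claim_equal_num_rotations : Prop := ∀ (num : Int), Dom_num_rotations num → Spec_num_rotations num (num_rotations num)

-- ===== LEMMAS AND PROOFS =====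

-- the i-th rotation of num with respect to digit count d, as B computes it
def pvRot (num : Int) (d i : Nat) : Int :=
  num % (10 ^ i) * 10 ^ (d - i) + num / (10 ^ i)

lemma pvRot_zero (num : Int) (d : Nat) : pvRot num d 0 = num := by
  simp [pvRot]

-- one iteration of A's loop maps rotation k to rotation k+1
lemma pvRot_step (num : Int) (d k : Nat) (h : k + 1 ≤ d) :
    pvRot num d k / 10 + pvRot num d k % 10 * 10 ^ (d - 1) = pvRot num d (k + 1) := by
  have hM : (0:Int) < 10 ^ k := by positivity
  have hpow1 : (10:Int) ^ (d - k) = 10 ^ (d - (k + 1)) * 10 := by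
    rw [← pow_succ]; congr 1; omega
  have hpow2 : (10:Int) ^ k * 10 ^ (d - (k + 1)) = 10 ^ (d - 1) := by
    rw [← pow_add]; congr 1; omega
  have hx : pvRot num d k = num / 10 ^ k + num % 10 ^ k * 10 ^ (d - (k + 1)) * 10 := by
    rw [pvRot, hpow1]; ring
  have hdiv : pvRot num d k / 10 = num % 10 ^ k * 10 ^ (d - (k + 1)) + num / 10 ^ k / 10 := by
    rw [hx]; omega
  have hmod : pvRot num d k % 10 = num / 10 ^ k % 10 := by
    rw [hx]; omega
  have hdd : num / 10 ^ (k + 1) = num / 10 ^ k / 10 := by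
    rw [Int.ediv_ediv_of_nonneg (le_of_lt hM), ← pow_succ]
  have hmm : num % 10 ^ (k + 1) = num / 10 ^ k % 10 * 10 ^ k + num % 10 ^ k := by
    have h1 : num % 10 ^ (k + 1) = num - 10 ^ (k + 1) * (num / 10 ^ (k + 1)) :=
      Int.emod_def num (10 ^ (k + 1))
    have h2 : 10 ^ k * (num / 10 ^ k) + num % 10 ^ k = num := Int.mul_ediv_add_emod num (10 ^ k)
    have h3 : 10 * (num / 10 ^ k / 10) + num / 10 ^ k % 10 = num / 10 ^ k :=
      Int.mul_ediv_add_emod (num / 10 ^ k) 10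
    rw [h1, hdd, pow_succ]
    linear_combination -h2 - (10 ^ k : Int) * h3
  rw [hdiv, hmod, pvRot, hmm, hdd, ← hpow2]
  ring

-- A's loop, started at rotation k with j iterations left, appends rotations k+1 … k+j
lemma loop_eq_map (num : Int) (d : Nat) :
    ∀ (j k : Nat) (acc : List Int), j + k = d - 1 →
    numRotationsLoop (10 ^ (d - 1)) j (pvRot num d k) acc
      = acc ++ (List.range j).map (fun t => pvRot num d (k + 1 + t)) := by
  intro j
  induction j with
  | zero => intro k acc _; simp [numRotationsLoop]
  | succ j ih =>
    intro k acc hjk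
    have hk1 : k + 1 ≤ d := by omega
    have hstep : PySem.Int.floordiv (pvRot num d k) 10
        + PySem.Int.mod (pvRot num d k) 10 * 10 ^ (d - 1) = pvRot num d (k + 1) := by
      rw [PySem.Int.mod_eq_emod_of_pos (by norm_num), PySem.Int.floordiv_eq_ediv_of_pos (by norm_num)]
      exact pvRot_step num d k hk1
    show numRotationsLoop (10 ^ (d - 1)) j
        (PySem.Int.floordiv (pvRot num d k) 10
          + PySem.Int.mod (pvRot num d k) 10 * 10 ^ (d - 1))
        (acc ++ [PySem.Int.floordiv (pvRot num d k) 10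
          + PySem.Int.mod (pvRot num d k) 10 * 10 ^ (d - 1)])
      = acc ++ (List.range (j + 1)).map (fun t => pvRot num d (k + 1 + t))
    rw [hstep, ih (k + 1) _ (by omega)]
    have hr : (List.range (j + 1)).map (fun t => pvRot num d (k + 1 + t))
        = pvRot num d (k + 1) :: (List.range j).map (fun t => pvRot num d (k + 1 + 1 + t)) := by
      rw [List.range_succ_eq_map, List.map_cons, List.map_map]
      refine congrArg₂ List.cons (by norm_num) ?_
      apply List.map_congr_left
      intro t _
      show pvRot num d (k + 1 + (t + 1)) = pvRot num d (k + 1 + 1 + t)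
      congr 1
      omega
    rw [hr]
    simp

-- B's comprehension is the same map over indices 1 … d-1
lemma alt_eq_map (num : Int) :
    num_rotations_alt num
      = (List.range ((PySem.Str.len (PySem.Int.toStr num)).toNat - 1)).map
          (fun t => pvRot num (PySem.Str.len (PySem.Int.toStr num)).toNat (1 + t)) := by
  unfold num_rotations_alt
  show (PySem.List.pyRange 1 (PySem.Str.len (PySem.Int.toStr num)) 1).map
      (fun i => PySem.Int.mod num (10 ^ i.toNat)
        * 10 ^ ((PySem.Str.len (PySem.Int.toStr num) - i).toNat)
        + PySem.Int.floordiv num (10 ^ i.toNat)) = _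
  have hL0 : 0 ≤ PySem.Str.len (PySem.Int.toStr num) := by
    rw [PySem.Str.len_eq]; positivity
  rw [PySem.List.pyRange_one, List.map_map]
  have hlen : ((PySem.Str.len (PySem.Int.toStr num)) - 1).toNat
      = (PySem.Str.len (PySem.Int.toStr num)).toNat - 1 := by omega
  rw [hlen]
  apply List.map_congr_left
  intro t ht
  have htlt : t < (PySem.Str.len (PySem.Int.toStr num)).toNat - 1 := List.mem_range.mp ht
  have h1 : ((1:Int) + (t:Int)).toNat = 1 + t := by omega
  have h2 : ((PySem.Str.len (PySem.Int.toStr num)) - (1 + (t:Int))).toNat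
      = (PySem.Str.len (PySem.Int.toStr num)).toNat - (1 + t) := by omega
  have hpos : (0:Int) < 10 ^ (1 + t) := by positivity
  simp only [Function.comp, h1, h2]
  rw [PySem.Int.mod_eq_emod_of_pos hpos, PySem.Int.floordiv_eq_ediv_of_pos hpos]
  rfl

-- ===== VERDICT (by name: the statement is the Claim_ definition above) =====
theorem num_rotations_spec : Claim_equal_num_rotations := by
  intro num _
  show num_rotations num = num_rotations_alt num
  unfold num_rotations
  show numRotationsLoop (10 ^ ((PySem.Str.len (PySem.Int.toStr num) - 1).toNat))
      ((PySem.Str.len (PySem.Int.toStr num) - 1).toNat) num [] = _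
  have hL0 : 0 ≤ PySem.Str.len (PySem.Int.toStr num) := by
    rw [PySem.Str.len_eq]; positivity
  have hfd : (PySem.Str.len (PySem.Int.toStr num) - 1).toNat
      = (PySem.Str.len (PySem.Int.toStr num)).toNat - 1 := by omega
  have hstart := loop_eq_map num (PySem.Str.len (PySem.Int.toStr num)).toNat
      ((PySem.Str.len (PySem.Int.toStr num)).toNat - 1) 0 [] (by omega)
  rw [pvRot_zero] at hstart
  rw [hfd, hstart, alt_eq_map num]
  simp only [List.nil_append]
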